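-- pv_equiv track=rewrite | github.com/yeha3015/py99 | py99-allanswers.py | maxen_aux
-- ===== SOURCE A (Python) =====
-- def maxen_aux(xs, maxnum, counter):
--     """
--     max_in_listの補助関数。
--     リストが空ならばそれまでに求めた最大数を返す。
--     そうでなければ、xsの最初の要素と比較する。
--     xs[0]が大きければ、それを最大値に書き換える。
--     等しければ、counterを+1する。
--     小さければ、そのまま.
--     その後、それぞれで次の数の評価を再帰的に呼び出している。
--     """
--     if xs == []:
--         return [maxnum] * counter
--     if xs[0] > maxnum:
--         return maxen_aux(xs[1:], xs[0], 1)
--     elif xs[0] == maxnum: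
--         return maxen_aux(xs[1:], maxnum, counter + 1)
--     return maxen_aux(xs[1:], maxnum, counter)
-- ===== SOURCE B (Python) =====
-- def maxen_aux(xs, maxnum, counter):
--     for x in xs:
--         if x > maxnum:
--             maxnum, counter = x, 1
--         elif x == maxnum:
--             counter += 1
--     return [maxnum] * counter
-- ===== Notes on version B (the rewrite author's own statement) =====
-- stated objective: faster
-- what changed: Replaces the xs[1:]-slicing recursion with a single iterative pass keeping (maxnum, counter) as loop state.
import Mathlib
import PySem

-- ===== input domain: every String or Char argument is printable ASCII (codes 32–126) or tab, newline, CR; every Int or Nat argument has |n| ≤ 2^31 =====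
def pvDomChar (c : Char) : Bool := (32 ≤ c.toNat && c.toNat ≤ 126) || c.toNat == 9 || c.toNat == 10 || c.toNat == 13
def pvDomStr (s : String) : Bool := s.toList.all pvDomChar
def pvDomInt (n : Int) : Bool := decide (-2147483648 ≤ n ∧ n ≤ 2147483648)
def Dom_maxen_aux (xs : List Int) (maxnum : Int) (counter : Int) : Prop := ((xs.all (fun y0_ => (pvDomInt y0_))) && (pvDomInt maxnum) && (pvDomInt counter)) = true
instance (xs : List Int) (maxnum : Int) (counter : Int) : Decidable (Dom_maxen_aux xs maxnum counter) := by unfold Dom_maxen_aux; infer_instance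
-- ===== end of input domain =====

-- B replaces A's O(n^2) slicing recursion by a single iterative pass (fold) over xs with (maxnum, counter) as loop state.

-- ===== PORT A =====
-- `[maxnum] * counter` with counter ≤ 0 is []; List.replicate counter.toNat is exact.
def maxen_aux (xs : List Int) (maxnum : Int) (counter : Int) : List Int :=
  match xs with
  | [] => List.replicate counter.toNat maxnum
  | x :: rest =>
    if x > maxnum then maxen_aux rest x 1
    else if x = maxnum then maxen_aux rest maxnum (counter + 1)
    else maxen_aux rest maxnum counter

-- ===== PORT B =====
def maxen_aux_alt (xs : List Int) (maxnum : Int) (counter : Int) : List Int :=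
  let st := xs.foldl (fun (st : Int × Int) x =>
    if x > st.1 then (x, 1)
    else if x = st.1 then (st.1, st.2 + 1)
    else st) (maxnum, counter)
  List.replicate st.2.toNat st.1

-- ===== PRECONDITION & SPEC =====
def Spec_maxen_aux (xs : List Int) (maxnum : Int) (counter : Int) (out : List Int) : Prop := out = maxen_aux_alt xs maxnum counter
instance (xs : List Int) (maxnum : Int) (counter : Int) (out : List Int) : Decidable (Spec_maxen_aux xs maxnum counter out) := by unfold Spec_maxen_aux; infer_instance

-- ===== CLAIM (what is proved, stated in full; the proofs are below) =====
def Claim_equal_maxen_aux : Prop := ∀ (xs : List Int) (maxnum : Int) (counter : Int), Dom_maxen_aux xs maxnum counter → Spec_maxen_aux xs maxnum counter (maxen_aux xs maxnum counter)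

-- ===== LEMMAS AND PROOFS =====
theorem maxen_aux_eq_alt (xs : List Int) (maxnum counter : Int) :
    maxen_aux xs maxnum counter = maxen_aux_alt xs maxnum counter := by
  induction xs generalizing maxnum counter with
  | nil => simp [maxen_aux, maxen_aux_alt]
  | cons x rest ih =>
    simp only [maxen_aux, maxen_aux_alt, List.foldl_cons]
    split_ifs with h1 h2 <;> simp_all [maxen_aux_alt]

-- ===== VERDICT (by name: the statement is the Claim_ definition above) =====
theorem maxen_aux_spec : Claim_equal_maxen_aux := by
  intro xs maxnum counter _
  exact maxen_aux_eq_alt xs maxnum counter
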